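-- pv_equiv track=rewrite | github.com/sambit-the-baa/AssanOne | ocr_training/text_postprocessing.py | fix_number_letter_confusion
-- ===== SOURCE A (Python) =====
-- def fix_number_letter_confusion(text: str, context: str = 'general') -> str:
--     """Fix common number/letter confusion based on context"""
--     if context == 'number':
--         # In numeric context, prefer numbers
--         replacements = {
--             'O': '0', 'o': '0',
--             'I': '1', 'l': '1',
--             'S': '5', 's': '5',
--             'Z': '2', 'z': '2',
--             'B': '8',
--         }
--     elif context == 'alpha':
--         # In alphabetic context, prefer letters
--         replacements = {
--             '0': 'O',
--             '1': 'I',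
--             '5': 'S',
--             '2': 'Z',
--             '8': 'B',
--         }
--     else:
--         return text
--
--     result = text
--     for wrong, correct in replacements.items():
--         result = result.replace(wrong, correct)
--     return result
-- ===== SOURCE B (Python) =====
-- _TABLES = {
--     'number': str.maketrans('OoIlSsZzB', '001155228'),
--     'alpha': str.maketrans('01528', 'OISZB'),
-- }
--
--
-- def fix_number_letter_confusion(text: str, context: str = 'general') -> str:
--     """Fix common number/letter confusion based on context (single-pass table lookup)."""
--     table = _TABLES.get(context)
--     if table is None:
--         return text
--     return text.translate(table)
-- ===== Notes on version B (the rewrite author's own statement) =====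
-- stated objective: idiomatic
-- what changed: Replaces the loop of nine/five repeated str.replace scans with one precomputed str.maketrans translation table applied in a single text.translate pass.
import Mathlib
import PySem

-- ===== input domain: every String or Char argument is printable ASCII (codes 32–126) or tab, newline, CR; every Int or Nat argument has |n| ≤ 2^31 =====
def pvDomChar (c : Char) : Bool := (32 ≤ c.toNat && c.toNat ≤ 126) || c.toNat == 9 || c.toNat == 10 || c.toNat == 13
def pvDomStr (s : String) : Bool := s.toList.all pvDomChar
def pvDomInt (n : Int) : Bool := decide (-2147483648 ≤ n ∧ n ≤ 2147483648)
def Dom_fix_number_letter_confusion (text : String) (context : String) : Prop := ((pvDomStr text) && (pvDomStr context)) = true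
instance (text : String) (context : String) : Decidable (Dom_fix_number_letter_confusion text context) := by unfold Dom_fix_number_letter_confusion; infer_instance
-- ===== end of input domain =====

-- B replaces A's loop of repeated str.replace scans by one translation table applied in a
-- single pass (str.maketrans/str.translate); same mapping, idiomatic single traversal.

-- ===== PORT A =====
-- the dict literal, in insertion order, iterated by the for loop
def pvNumberPairs : List (String × String) :=
  [("O", "0"), ("o", "0"), ("I", "1"), ("l", "1"), ("S", "5"), ("s", "5"),
   ("Z", "2"), ("z", "2"), ("B", "8")]

def pvAlphaPairs : List (String × String) :=
  [("0", "O"), ("1", "I"), ("5", "S"), ("2", "Z"), ("8", "B")]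

def fix_number_letter_confusion (text : String) (context : String) : String :=
  if context == "number" then
    pvNumberPairs.foldl (fun result p => PySem.Str.replace result p.1 p.2) text
  else if context == "alpha" then
    pvAlphaPairs.foldl (fun result p => PySem.Str.replace result p.1 p.2) text
  else
    text

-- ===== PORT B =====
-- the str.maketrans tables: character → character, as association lists
def pvNumberTable : PySem.Dict Char Char :=
  ⟨
  [('O', '0'), ('o', '0'), ('I', '1'), ('l', '1'), ('S', '5'), ('s', '5'),
   ('Z', '2'), ('z', '2'), ('B', '8')]⟩

def pvAlphaTable : PySem.Dict Char Char :=
  ⟨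
  [('0', 'O'), ('1', 'I'), ('5', 'S'), ('2', 'Z'), ('8', 'B')]⟩

-- text.translate(table): one pass, each char looked up in the table (itself if absent)
def pvTranslate (table : PySem.Dict Char Char) (text : String) : String :=
  String.ofList (text.toList.map (fun c => PySem.Dict.getD table c c))

def fix_number_letter_confusion_alt (text : String) (context : String) : String :=
  if context == "number" then pvTranslate pvNumberTable text
  else if context == "alpha" then pvTranslate pvAlphaTable text
  else text

-- ===== PRECONDITION & SPEC =====
def Spec_fix_number_letter_confusion (text : String) (context : String) (out : String) : Prop := out = fix_number_letter_confusion_alt text context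
instance (text : String) (context : String) (out : String) : Decidable (Spec_fix_number_letter_confusion text context out) := by unfold Spec_fix_number_letter_confusion; infer_instance

-- ===== CLAIM (what is proved, stated in full; the proofs are below) =====
def Claim_equal_fix_number_letter_confusion : Prop := ∀ (text : String) (context : String), Dom_fix_number_letter_confusion text context → Spec_fix_number_letter_confusion text context (fix_number_letter_confusion text context)

-- ===== LEMMAS AND PROOFS =====

-- replace.go with a single-character pattern is a pointwise character map
theorem pv_go_single (c d : Char) : ∀ (l acc : List Char) (fuel : Nat), l.length ≤ fuel →
    PySem.Chars.replace.go [c] [d] fuel l acc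
      = acc.reverse ++ l.map (fun x => if x = c then d else x) := by
  intro l
  induction l with
  | nil =>
    intro acc fuel _
    cases fuel <;> simp [PySem.Chars.replace.go]
  | cons a t ih =>
    intro acc fuel hf
    cases fuel with
    | zero => simp at hf
    | succ f =>
      simp only [PySem.Chars.replace.go, List.isPrefixOf, Bool.and_true]
      by_cases h : a = c
      · subst h
        simp only [beq_self_eq_true, if_true]
        have hd : List.drop [a].length (a :: t) = t := by simp
        have ha : [d].reverse ++ acc = d :: acc := by simp
        rw [hd, ha, ih (d :: acc) f (by simp at hf; omega)]
        simp
      · have hb : (c == a) = false := by simp [Ne.symm h]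
        simp only [hb, Bool.false_eq_true, if_false]
        rw [ih (a :: acc) f (by simp at hf; omega)]
        simp [h]

-- single-character replace on char lists is List.map
theorem pv_replace_single (s : List Char) (c d : Char) :
    PySem.Chars.replace s [c] [d] = s.map (fun x => if x = c then d else x) := by
  simp only [PySem.Chars.replace, List.isEmpty_cons]
  rw [pv_go_single c d s [] s.length le_rfl]
  simp

-- A's loop of single-character replaces is one pass applying the folded substitutions per char
theorem pv_fold (qs : List (Char × Char)) (s : String) :
    (qs.map (fun q => (String.singleton q.1, String.singleton q.2))).foldl
        (fun result p => PySem.Str.replace result p.1 p.2) s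
      = String.ofList (s.toList.map
          (fun c => qs.foldl (fun x q => if x = q.1 then q.2 else x) c)) := by
  induction qs generalizing s with
  | nil => simp
  | cons q qs ih =>
    simp only [List.map_cons, List.foldl_cons]
    rw [ih]
    have ht : (PySem.Str.replace s (String.singleton q.1) (String.singleton q.2)).toList
        = s.toList.map (fun x => if x = q.1 then q.2 else x) := by
      simp [PySem.Str.replace, String.singleton, pv_replace_single]
    rw [ht, List.map_map]
    rfl

-- per character, folding the nine 'number' substitutions is the table lookup
theorem pv_num_pointwise (x : Char) :
    pvNumberTable.items.foldl (fun c q => if c = q.1 then q.2 else c) x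
      = PySem.Dict.getD pvNumberTable x x := by
  by_cases h1 : x = 'O'; · subst h1; decide
  by_cases h2 : x = 'o'; · subst h2; decide
  by_cases h3 : x = 'I'; · subst h3; decide
  by_cases h4 : x = 'l'; · subst h4; decide
  by_cases h5 : x = 'S'; · subst h5; decide
  by_cases h6 : x = 's'; · subst h6; decide
  by_cases h7 : x = 'Z'; · subst h7; decide
  by_cases h8 : x = 'z'; · subst h8; decide
  by_cases h9 : x = 'B'; · subst h9; decide
  have b1 : ('O' == x) = false := by simp [Ne.symm h1]
  have b2 : ('o' == x) = false := by simp [Ne.symm h2]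
  have b3 : ('I' == x) = false := by simp [Ne.symm h3]
  have b4 : ('l' == x) = false := by simp [Ne.symm h4]
  have b5 : ('S' == x) = false := by simp [Ne.symm h5]
  have b6 : ('s' == x) = false := by simp [Ne.symm h6]
  have b7 : ('Z' == x) = false := by simp [Ne.symm h7]
  have b8 : ('z' == x) = false := by simp [Ne.symm h8]
  have b9 : ('B' == x) = false := by simp [Ne.symm h9]
  simp [pvNumberTable, PySem.Dict.getD, PySem.Dict.get?, List.find?, List.foldl,
    h1, h2, h3, h4, h5, h6, h7, h8, h9, b1, b2, b3, b4, b5, b6, b7, b8, b9]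

-- per character, folding the five 'alpha' substitutions is the table lookup
theorem pv_alpha_pointwise (x : Char) :
    pvAlphaTable.items.foldl (fun c q => if c = q.1 then q.2 else c) x
      = PySem.Dict.getD pvAlphaTable x x := by
  by_cases h1 : x = '0'; · subst h1; decide
  by_cases h2 : x = '1'; · subst h2; decide
  by_cases h3 : x = '5'; · subst h3; decide
  by_cases h4 : x = '2'; · subst h4; decide
  by_cases h5 : x = '8'; · subst h5; decide
  have b1 : ('0' == x) = false := by simp [Ne.symm h1]
  have b2 : ('1' == x) = false := by simp [Ne.symm h2]
  have b3 : ('5' == x) = false := by simp [Ne.symm h3]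
  have b4 : ('2' == x) = false := by simp [Ne.symm h4]
  have b5 : ('8' == x) = false := by simp [Ne.symm h5]
  simp [pvAlphaTable, PySem.Dict.getD, PySem.Dict.get?, List.find?, List.foldl,
    h1, h2, h3, h4, h5, b1, b2, b3, b4, b5]

-- ===== VERDICT (by name: the statement is the Claim_ definition above) =====
theorem fix_number_letter_confusion_spec : Claim_equal_fix_number_letter_confusion := by
  unfold Claim_equal_fix_number_letter_confusion
  intro text context _
  unfold Spec_fix_number_letter_confusion fix_number_letter_confusion fix_number_letter_confusion_alt
  by_cases hn : context == "number"
  · rw [if_pos hn, if_pos hn]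
    have hp : pvNumberPairs
        = pvNumberTable.items.map (fun q => (String.singleton q.1, String.singleton q.2)) := by
      decide
    rw [hp, pv_fold pvNumberTable.items text]
    unfold pvTranslate
    exact congrArg String.ofList (List.map_congr_left fun x _ => pv_num_pointwise x)
  · rw [if_neg hn, if_neg hn]
    by_cases ha : context == "alpha"
    · rw [if_pos ha, if_pos ha]
      have hp : pvAlphaPairs
          = pvAlphaTable.items.map (fun q => (String.singleton q.1, String.singleton q.2)) := by
        decide
      rw [hp, pv_fold pvAlphaTable.items text]
      unfold pvTranslate
      exact congrArg String.ofList (List.map_congr_left fun x _ => pv_alpha_pointwise x)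
    · rw [if_neg ha, if_neg ha]
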